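-- pv_equiv track=rewrite | github.com/itrummer/dbz | libraries/row_lists.py | left_outer_join
-- ===== SOURCE A (Python) =====
-- def left_outer_join(table_1, table_2, key_cols_1, key_cols_2):
--     """ Join two tables by left outer join.
--
--     Args:
--         table_1: a list of rows where each row is a list.
--         table_2: a list of rows where each row is a list.
--         key_cols_1: indexes of join key columns in table 1.
--         key_cols_2: indexes of join key columns in table 2.
--
--     Returns:
--         Joined rows with matching join keys.
--     """
--     # Create a hash table for table_2
--     hash_table = {}
--     for row in table_2:
--         key = tuple(row[i] for i in key_cols_2)
--         if key in hash_table: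
--             hash_table[key].append(row)
--         else:
--             hash_table[key] = [row]
--     # Scan table_1 and look up in hash table
--     joined_rows = []
--     for row in table_1:
--         key = tuple(row[i] for i in key_cols_1)
--         if key in hash_table:
--             for row_2 in hash_table[key]:
--                 joined_rows.append(row + row_2)
--         else:
--             joined_rows.append(row + [None] * len(table_2[0]))
--     return joined_rows
-- ===== SOURCE B (Python) =====
-- def left_outer_join(table_1, table_2, key_cols_1, key_cols_2):
--     """Left outer join, as a plain nested-loop scan (no hash table)."""
--     joined_rows = []
--     for row in table_1:
--         key = tuple(row[i] for i in key_cols_1)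
--         found = False
--         for row_2 in table_2:
--             if tuple(row_2[i] for i in key_cols_2) == key:
--                 joined_rows.append(row + row_2)
--                 found = True
--         if not found:
--             joined_rows.append(row + [None] * len(table_2[0]))
--     return joined_rows
-- ===== Notes on version B (the rewrite author's own statement) =====
-- stated objective: alternative
-- what changed: Replaces A's precomputed hash index grouping table_2 rows by key with a direct nested-loop join that rescans table_2 for every table_1 row, tracking matches with a flag.
import Mathlib
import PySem

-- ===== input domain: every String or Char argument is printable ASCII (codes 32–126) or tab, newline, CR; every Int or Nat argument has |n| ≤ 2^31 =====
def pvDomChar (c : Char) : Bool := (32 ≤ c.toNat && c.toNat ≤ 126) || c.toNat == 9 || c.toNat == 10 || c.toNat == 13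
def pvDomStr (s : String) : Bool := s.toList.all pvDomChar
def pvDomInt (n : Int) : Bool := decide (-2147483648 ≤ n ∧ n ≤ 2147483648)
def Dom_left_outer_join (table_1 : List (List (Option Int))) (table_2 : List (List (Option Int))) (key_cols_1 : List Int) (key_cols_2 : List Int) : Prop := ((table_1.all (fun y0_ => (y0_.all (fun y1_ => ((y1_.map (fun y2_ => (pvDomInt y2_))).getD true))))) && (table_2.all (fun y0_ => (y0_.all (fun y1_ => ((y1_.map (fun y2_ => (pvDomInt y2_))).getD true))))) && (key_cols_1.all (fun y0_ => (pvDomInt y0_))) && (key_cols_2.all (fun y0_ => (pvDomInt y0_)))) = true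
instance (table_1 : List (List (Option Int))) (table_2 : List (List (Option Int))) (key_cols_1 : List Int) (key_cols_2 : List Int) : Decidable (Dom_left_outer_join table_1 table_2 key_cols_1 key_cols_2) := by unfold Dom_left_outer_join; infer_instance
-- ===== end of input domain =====

-- B replaces A's hash-index join with a direct nested-loop join (same output, quadratic instead of hashed; objective: alternative).


-- ===== PORT A =====
-- tuple(row[i] for i in cols); out-of-range indices (an IndexError in Python) are excluded by Pre_ below.
def rowKey (row : List (Option Int)) (cols : List Int) : List (Option Int) :=
  cols.map (fun i => (PySem.List.pyGet? row i).getD none)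

def left_outer_join (table_1 : List (List (Option Int))) (table_2 : List (List (Option Int))) (key_cols_1 : List Int) (key_cols_2 : List Int) : List (List (Option Int)) :=
  -- Create a hash table for table_2
  let hash_table : PySem.Dict (List (Option Int)) (List (List (Option Int))) :=
    table_2.foldl (fun h row =>
      let key := rowKey row key_cols_2
      if h.contains key then h.insert key (h.getD key [] ++ [row])
      else h.insert key [row]) PySem.Dict.empty
  -- Scan table_1 and look up in hash table
  table_1.foldl (fun joined_rows row =>
    let key := rowKey row key_cols_1
    if hash_table.contains key then
      joined_rows ++ (hash_table.getD key []).map (fun row_2 => row ++ row_2)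
    else
      -- len(table_2[0]): Python raises IndexError on empty table_2 (excluded by Pre_)
      joined_rows ++ [row ++ List.replicate (table_2.headD []).length none]) []

-- ===== PORT B =====
def left_outer_join_alt (table_1 : List (List (Option Int))) (table_2 : List (List (Option Int))) (key_cols_1 : List Int) (key_cols_2 : List Int) : List (List (Option Int)) :=
  table_1.foldl (fun joined_rows row =>
    let key := rowKey row key_cols_1
    let st := table_2.foldl (fun (st : List (List (Option Int)) × Bool) row_2 =>
        if rowKey row_2 key_cols_2 = key then (st.1 ++ [row ++ row_2], true) else st)
      (joined_rows, false)
    if st.2 then st.1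
    else st.1 ++ [row ++ List.replicate (table_2.headD []).length none]) []

-- ===== PRECONDITION & SPEC =====
-- Pre_ excludes exactly the inputs on which the Python A raises: a key index out of range
-- for some row (IndexError in the key tuple), or an empty table_2 with a nonempty table_1
-- (then every table_1 row is unmatched and len(table_2[0]) raises IndexError).
def Pre_left_outer_join (table_1 : List (List (Option Int))) (table_2 : List (List (Option Int))) (key_cols_1 : List Int) (key_cols_2 : List Int) : Prop :=
  (table_2 = [] → table_1 = []) ∧
  (∀ row ∈ table_1, ∀ i ∈ key_cols_1, PySem.Raise.InRange row.length i) ∧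
  (∀ row ∈ table_2, ∀ i ∈ key_cols_2, PySem.Raise.InRange row.length i)
instance (table_1 : List (List (Option Int))) (table_2 : List (List (Option Int))) (key_cols_1 : List Int) (key_cols_2 : List Int) : Decidable (Pre_left_outer_join table_1 table_2 key_cols_1 key_cols_2) := by unfold Pre_left_outer_join; infer_instance

def pvWitness_left_outer_join : List (List (Option Int)) × List (List (Option Int)) × List Int × List Int :=
  ([[some 1, some 2], [some 3, none]], [[some 1, some 9], [some 4, some 5], [some 1, none]], [0], [0])

def Spec_left_outer_join (table_1 : List (List (Option Int))) (table_2 : List (List (Option Int))) (key_cols_1 : List Int) (key_cols_2 : List Int) (out : List (List (Option Int))) : Prop := out = left_outer_join_alt table_1 table_2 key_cols_1 key_cols_2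
instance (table_1 : List (List (Option Int))) (table_2 : List (List (Option Int))) (key_cols_1 : List Int) (key_cols_2 : List Int) (out : List (List (Option Int))) : Decidable (Spec_left_outer_join table_1 table_2 key_cols_1 key_cols_2 out) := by unfold Spec_left_outer_join; infer_instance

-- ===== CLAIM (what is proved, stated in full; the proofs are below) =====
def Claim_equal_left_outer_join : Prop := ∀ (table_1 : List (List (Option Int))) (table_2 : List (List (Option Int))) (key_cols_1 : List Int) (key_cols_2 : List Int), Dom_left_outer_join table_1 table_2 key_cols_1 key_cols_2 → Pre_left_outer_join table_1 table_2 key_cols_1 key_cols_2 → Spec_left_outer_join table_1 table_2 key_cols_1 key_cols_2 (left_outer_join table_1 table_2 key_cols_1 key_cols_2)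

-- ===== LEMMAS AND PROOFS =====

-- the rows of t2 whose key equals k, in original order
def matchRows (t2 : List (List (Option Int))) (kc2 : List Int) (k : List (Option Int)) : List (List (Option Int)) :=
  t2.filter (fun r => rowKey r kc2 = k)

-- the rows of t2 whose key equals k, in original order (already defined above)
-- A's hash-table build: getD after the fold is the accumulated group
theorem build_getD (kc2 : List Int) (t2 : List (List (Option Int)))
    (h : PySem.Dict (List (Option Int)) (List (List (Option Int)))) (k : List (Option Int)) :
    (t2.foldl (fun h row =>
      let key := rowKey row kc2
      if h.contains key then h.insert key (h.getD key [] ++ [row])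
      else h.insert key [row]) h).getD k []
    = h.getD k [] ++ matchRows t2 kc2 k := by
  induction t2 generalizing h with
  | nil => simp [matchRows]
  | cons r rest ih =>
    simp only [List.foldl_cons]
    rw [ih]
    by_cases hk : k = rowKey r kc2
    · have hfil : matchRows (r :: rest) kc2 k = r :: matchRows rest kc2 k := by
        simp [matchRows, hk.symm]
      rw [hfil]
      by_cases hc : h.contains (rowKey r kc2)
      · rw [if_pos hc, PySem.Dict.getD_insert, if_pos hk, hk]
        simp
      · rw [if_neg hc, PySem.Dict.getD_insert, if_pos hk, hk]
        have h0 := PySem.Dict.getD_of_not_contains (d := h) (k := rowKey r kc2)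
          (d0 := ([] : List (List (Option Int)))) (by simpa using hc)
        rw [h0]
        simp
    · have hne : ¬ rowKey r kc2 = k := fun e => hk e.symm
      have hfil : matchRows (r :: rest) kc2 k = matchRows rest kc2 k := by
        simp [matchRows, hne]
      rw [hfil]
      by_cases hc : h.contains (rowKey r kc2)
      · rw [if_pos hc, PySem.Dict.getD_insert, if_neg hk]
      · rw [if_neg hc, PySem.Dict.getD_insert, if_neg hk]

-- A's hash-table build: contains after the fold
theorem build_contains (kc2 : List Int) (t2 : List (List (Option Int)))
    (h : PySem.Dict (List (Option Int)) (List (List (Option Int)))) (k : List (Option Int)) :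
    (t2.foldl (fun h row =>
      let key := rowKey row kc2
      if h.contains key then h.insert key (h.getD key [] ++ [row])
      else h.insert key [row]) h).contains k
    = (h.contains k || t2.any (fun r => rowKey r kc2 = k)) := by
  induction t2 generalizing h with
  | nil => simp
  | cons r rest ih =>
    simp only [List.foldl_cons, List.any_cons]
    by_cases hc : h.contains (rowKey r kc2)
    · rw [if_pos hc, ih, PySem.Dict.contains_insert]
      by_cases hk : k = rowKey r kc2
      · subst hk; simp
      · have hne : ¬ rowKey r kc2 = k := fun e => hk e.symm
        rw [beq_eq_false_iff_ne.mpr hk]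
        simp [hne]
    · rw [if_neg hc, ih, PySem.Dict.contains_insert]
      by_cases hk : k = rowKey r kc2
      · subst hk; simp
      · have hne : ¬ rowKey r kc2 = k := fun e => hk e.symm
        rw [beq_eq_false_iff_ne.mpr hk]
        simp [hne]

-- B's inner scan over t2 from any state
theorem inner_scan (kc2 : List Int) (t2 : List (List (Option Int)))
    (row : List (Option Int)) (key : List (Option Int)) (acc : List (List (Option Int))) (b : Bool) :
    t2.foldl (fun (st : List (List (Option Int)) × Bool) row_2 =>
        if rowKey row_2 kc2 = key then (st.1 ++ [row ++ row_2], true) else st) (acc, b)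
    = (acc ++ (matchRows t2 kc2 key).map (fun r2 => row ++ r2),
       b || t2.any (fun r => rowKey r kc2 = key)) := by
  induction t2 generalizing acc b with
  | nil => simp [matchRows]
  | cons r rest ih =>
    simp only [List.foldl_cons, List.any_cons]
    by_cases hm : rowKey r kc2 = key
    · rw [if_pos hm, ih]
      simp [matchRows, hm, List.append_assoc]
    · rw [if_neg hm, ih]
      simp [matchRows, hm]

-- filter is empty when any is false
theorem matchRows_nil_of_not_any (kc2 : List Int) (t2 : List (List (Option Int))) (k : List (Option Int))
    (h : t2.any (fun r => rowKey r kc2 = k) = false) : matchRows t2 kc2 k = [] := by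
  simp only [matchRows, List.filter_eq_nil_iff]
  intro r hr
  simp only [List.any_eq_false] at h
  simpa using h r hr

theorem left_outer_join_eq_alt (table_1 table_2 : List (List (Option Int))) (key_cols_1 key_cols_2 : List Int) :
    left_outer_join table_1 table_2 key_cols_1 key_cols_2 = left_outer_join_alt table_1 table_2 key_cols_1 key_cols_2 := by
  unfold left_outer_join left_outer_join_alt
  dsimp only
  congr 1
  funext joined_rows row
  rw [inner_scan, build_contains, build_getD]
  simp only [PySem.Dict.contains_empty, PySem.Dict.getD_empty, Bool.false_or, List.nil_append]
  by_cases ha : table_2.any (fun r => rowKey r key_cols_2 = rowKey row key_cols_1) = true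
  · simp [ha]
  · have ha' : table_2.any (fun r => rowKey r key_cols_2 = rowKey row key_cols_1) = false := by
      simpa using ha
    rw [matchRows_nil_of_not_any _ _ _ ha']
    simp [ha']

-- ===== VERDICT (by name: the statement is the Claim_ definition above) =====
theorem left_outer_join_spec : Claim_equal_left_outer_join := by
  intro t1 t2 k1 k2 _ _
  unfold Spec_left_outer_join
  exact left_outer_join_eq_alt t1 t2 k1 k2
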